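-- pv_equiv track=rewrite | github.com/uvsq22005562/PROJET_CRYPTO_Jules_Marty | texte_N°4/dechiffrement_texte4.py | texte_en_liste
-- ===== SOURCE A (Python) =====
-- def texte_en_liste(texte):
--     ''' change le format du texte, place chaque ligne dans
--     une liste '''
--     res = []
--     temp = ''
--     for elm in texte:
--         if elm != '\n':
--             temp += elm
--         elif len(temp) > 1:
--             res.append(temp)
--             temp = ''
--     return res
-- ===== SOURCE B (Python) =====
-- def texte_en_liste(texte):
--     ''' change le format du texte, place chaque ligne dans
--     une liste '''
--     return [ligne for ligne in texte.split('\n')[:-1] if len(ligne) > 1]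
-- ===== Notes on version B (the rewrite author's own statement) =====
-- stated objective: idiomatic
-- what changed: B splits the text on newlines once and keeps the terminated lines longer than one character with a list comprehension, instead of A's character-by-character scan with a manual buffer.
-- intended difference: On texts containing a newline-terminated 1-character line followed by a later nonempty terminated line, A never resets its buffer on short lines and so glues the stray character onto the next emitted line (e.g. 'a\nbc\n' gives ['abc']), while B simply drops lines of length <= 1 and returns ['bc'], which is the intended per-line behaviour of the docstring. — e.g. on texte_en_liste("a\nbc\n"): A returns ["abc"], B returns ["bc"]
import Mathlib
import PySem

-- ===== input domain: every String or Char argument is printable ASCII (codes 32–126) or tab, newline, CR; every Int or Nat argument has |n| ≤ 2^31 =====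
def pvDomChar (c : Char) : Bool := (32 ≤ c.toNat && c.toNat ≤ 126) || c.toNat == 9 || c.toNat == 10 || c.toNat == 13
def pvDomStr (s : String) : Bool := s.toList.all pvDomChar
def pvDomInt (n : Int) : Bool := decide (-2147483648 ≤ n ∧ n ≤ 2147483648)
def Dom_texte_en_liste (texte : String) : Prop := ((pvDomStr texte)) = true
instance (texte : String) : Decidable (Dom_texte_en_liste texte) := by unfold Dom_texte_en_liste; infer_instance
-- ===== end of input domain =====

-- B splits the text on '\n' once and keeps terminated lines longer than one character by a
-- comprehension, instead of A's char-by-char scan with a buffer; on texts with a stray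
-- 1-char terminated line A glues it onto the next line (never resetting its buffer) while
-- B drops it — stated as D_ below with a proved exact-difference theorem.


-- ===== PORT A =====
-- one step of A's loop body: state = (res, temp), strings as List Char
def pvStepA (st : List (List Char) × List Char) (c : Char) : List (List Char) × List Char :=
  if c ≠ '\n' then (st.1, st.2 ++ [c])
  else if st.2.length > 1 then (st.1 ++ [st.2], [])
  else st

def texte_en_liste (texte : String) : List String :=
  (texte.toList.foldl pvStepA ([], [])).1.map (fun l => String.ofList l)

-- ===== PORT B =====
def texte_en_liste_alt (texte : String) : List String :=
  ((PySem.List.slice (PySem.Chars.splitOn texte.toList ['\n']) none (some (-1))).filter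
      (fun l => l.length > 1)).map (fun l => String.ofList l)

-- ===== PRECONDITION & SPEC =====
-- On texts with a newline-terminated 1-character line followed by a later nonempty
-- terminated line, A (which never resets its buffer on short lines) glues the stray
-- character onto the next emitted line, while B drops lines of length ≤ 1 — the
-- intended per-line behaviour of the docstring.
def pvHasStray : List (List Char) → Bool
  | [] => false
  | x :: xs => (x.length == 1 && xs.any (fun y => !y.isEmpty)) || pvHasStray xs

def D_texte_en_liste (texte : String) : Prop :=
  pvHasStray ((PySem.Chars.splitOn texte.toList ['\n']).dropLast) = true
instance (texte : String) : Decidable (D_texte_en_liste texte) := by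
  unfold D_texte_en_liste; infer_instance

def Spec_texte_en_liste (texte : String) (out : List String) : Prop :=
  ¬ D_texte_en_liste texte → out = texte_en_liste_alt texte
instance (texte : String) (out : List String) : Decidable (Spec_texte_en_liste texte out) := by
  unfold Spec_texte_en_liste; infer_instance

def pvDiffWitness_texte_en_liste : String := "a\nbc\n"
def pvDiffWitnessOut_texte_en_liste : (List String) × (List String) := (["abc"], ["bc"])

-- ===== CLAIM (what is proved, stated in full; the proofs are below) =====
def Claim_unchanged_texte_en_liste : Prop :=
  ∀ (texte : String), Dom_texte_en_liste texte →
    Spec_texte_en_liste texte (texte_en_liste texte)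
def Claim_changed_texte_en_liste : Prop :=
  Dom_texte_en_liste (pvDiffWitness_texte_en_liste) ∧
  D_texte_en_liste (pvDiffWitness_texte_en_liste) ∧
  texte_en_liste (pvDiffWitness_texte_en_liste) = pvDiffWitnessOut_texte_en_liste.1 ∧
  texte_en_liste_alt (pvDiffWitness_texte_en_liste) = pvDiffWitnessOut_texte_en_liste.2 ∧
  pvDiffWitnessOut_texte_en_liste.1 ≠ pvDiffWitnessOut_texte_en_liste.2
def Claim_exact_texte_en_liste : Prop :=
  ∀ (texte : String), Dom_texte_en_liste texte → D_texte_en_liste texte →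
    texte_en_liste texte ≠ texte_en_liste_alt texte

-- ===== LEMMAS AND PROOFS =====

-- A's loop, regrouped per split piece (proof-only helper): state = (res, buf)
def pvStepB (st : List (List Char) × List Char) (piece : List Char) : List (List Char) × List Char :=
  let buf := st.2 ++ piece
  if buf.length > 1 then (st.1 ++ [buf], []) else (st.1, buf)

-- structural recursion computing s.split('\n') on List Char
def splitNL : List Char → List (List Char)
  | [] => [[]]
  | c :: cs =>
    if c = '\n' then [] :: splitNL cs
    else
      match splitNL cs with
      | [] => [[c]]
      | p :: ps => (c :: p) :: ps

lemma splitNL_ne_nil (cs : List Char) : splitNL cs ≠ [] := by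
  cases cs with
  | nil => simp [splitNL]
  | cons c cs =>
    simp only [splitNL]
    split
    · simp
    · split <;> simp

lemma go_eq_splitNL : ∀ (l : List Char) (fuel : Nat) (cur : List Char) (acc : List (List Char)),
    l.length ≤ fuel →
    PySem.Chars.splitOn.go ['\n'] fuel l cur acc =
      acc.reverse ++ (cur.reverse ++ (splitNL l).headI) :: (splitNL l).tail := by
  intro l
  induction l with
  | nil =>
    intro fuel cur acc _
    cases fuel <;> simp [PySem.Chars.splitOn.go, splitNL]
  | cons c rest ih =>
    intro fuel cur acc hf
    cases fuel with
    | zero => simp at hf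
    | succ f =>
      by_cases hc : c = '\n'
      · subst hc
        have hpre : (['\n'] : List Char).isPrefixOf ('\n' :: rest) = true := by
          simp [List.isPrefixOf]
        rw [PySem.Chars.splitOn.go]
        simp only [hpre, if_pos]
        have hd : List.drop (['\n'] : List Char).length ('\n' :: rest) = rest := rfl
        rw [hd, ih f [] (cur.reverse :: acc) (by simpa using Nat.le_of_succ_le_succ hf)]
        obtain ⟨p, ps, hrest⟩ := List.exists_cons_of_ne_nil (splitNL_ne_nil rest)
        simp [splitNL, hrest]
      · have hpre : (['\n'] : List Char).isPrefixOf (c :: rest) = false := by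
          simp [List.isPrefixOf, Ne.symm hc]
        rw [PySem.Chars.splitOn.go]
        simp only [hpre, Bool.false_eq_true, if_neg, not_false_iff]
        rw [ih f (c :: cur) acc (by simpa using Nat.le_of_succ_le_succ hf)]
        obtain ⟨p, ps, hrest⟩ := List.exists_cons_of_ne_nil (splitNL_ne_nil rest)
        simp [splitNL, hc, hrest]

lemma splitOn_eq_splitNL (cs : List Char) :
    PySem.Chars.splitOn cs ['\n'] = splitNL cs := by
  have h := go_eq_splitNL cs (cs.length + 1) [] [] (by omega)
  unfold PySem.Chars.splitOn
  rw [h]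
  obtain ⟨p, ps, hcs⟩ := List.exists_cons_of_ne_nil (splitNL_ne_nil cs)
  simp [hcs]

lemma foldA_eq : ∀ (cs : List Char) (res : List (List Char)) (temp : List Char),
    cs.foldl pvStepA (res, temp) =
      (((splitNL cs).dropLast.foldl pvStepB (res, temp)).1,
       ((splitNL cs).dropLast.foldl pvStepB (res, temp)).2 ++ (splitNL cs).getLastD []) := by
  intro cs
  induction cs with
  | nil => intro res temp; simp [splitNL]
  | cons c rest ih =>
    intro res temp
    obtain ⟨p, ps, hrest⟩ := List.exists_cons_of_ne_nil (splitNL_ne_nil rest)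
    by_cases hc : c = '\n'
    · subst hc
      have hstep : pvStepA (res, temp) '\n' = pvStepB (res, temp) [] := by
        simp [pvStepA, pvStepB]
      rw [List.foldl_cons, hstep]
      rw [show splitNL ('\n' :: rest) = [] :: splitNL rest by simp [splitNL]]
      rw [hrest, List.dropLast_cons_of_ne_nil (by simp), List.foldl_cons]
      rw [← hrest, ih (pvStepB (res, temp) []).1 (pvStepB (res, temp) []).2]
      simp [hrest]
    · have hsplit : splitNL (c :: rest) = (c :: p) :: ps := by
        simp [splitNL, hc, hrest]
      rw [List.foldl_cons]
      rw [show pvStepA (res, temp) c = (res, temp ++ [c]) by simp [pvStepA, hc]]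
      rw [ih res (temp ++ [c]), hsplit, hrest]
      cases ps with
      | nil => simp
      | cons q qs =>
        have hbs : pvStepB (res, temp ++ [c]) p = pvStepB (res, temp) (c :: p) := by
          simp [pvStepB]
        rw [show ((c :: p) :: q :: qs).dropLast = (c :: p) :: (q :: qs).dropLast from
              List.dropLast_cons_of_ne_nil (by simp),
            show (p :: q :: qs).dropLast = p :: (q :: qs).dropLast from
              List.dropLast_cons_of_ne_nil (by simp),
            List.foldl_cons, List.foldl_cons, hbs]
        simp

-- with the buffer empty/short and only empty pieces left, the fold is inert
lemma foldB_all_empty : ∀ (ps : List (List Char)) (res : List (List Char)) (t : List Char),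
    t.length ≤ 1 → ps.all (fun y => y.isEmpty) = true →
    ps.foldl pvStepB (res, t) = (res, t) := by
  intro ps
  induction ps with
  | nil => intro res t _ _; rfl
  | cons x xs ih =>
    intro res t ht hall
    simp only [List.all_cons, Bool.and_eq_true, List.isEmpty_iff] at hall
    obtain ⟨hx, hxs⟩ := hall
    subst hx
    rw [List.foldl_cons, show pvStepB (res, t) [] = (res, t) by
      simp [pvStepB]; omega]
    exact ih res t ht (by simpa using hxs)

-- no stray 1-char piece: A's regrouped fold is exactly B's filter
lemma foldB_no_stray : ∀ (ps : List (List Char)) (res : List (List Char)),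
    pvHasStray ps = false →
    (ps.foldl pvStepB (res, [])).1 = res ++ ps.filter (fun l => l.length > 1) := by
  intro ps
  induction ps with
  | nil => intro res _; simp
  | cons x xs ih =>
    intro res h
    simp only [pvHasStray, Bool.or_eq_false_iff, Bool.and_eq_false_iff] at h
    obtain ⟨h1, h2⟩ := h
    by_cases hx : x.length > 1
    · rw [List.foldl_cons, show pvStepB (res, []) x = (res ++ [x], []) by
        simp [pvStepB, hx]]
      rw [ih (res ++ [x]) h2]
      simp [hx]
    · rcases h1 with h1 | h1
      · -- x.length ≠ 1, so x = []
        have hx0 : x = [] := by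
          have h1' : x.length ≠ 1 := by simpa using h1
          cases x with
          | nil => rfl
          | cons a l =>
            exfalso
            have e1 : l.length + 1 ≠ 1 := by simpa using h1'
            have e2 : ¬ l.length + 1 > 1 := by simpa using hx
            omega
        subst hx0
        rw [List.foldl_cons, show pvStepB (res, ([] : List Char)) [] = (res, []) by
          simp [pvStepB]]
        rw [ih res h2]
        simp
      · -- all later pieces empty: fold is inert, filter keeps nothing
        have hx1 : x.length ≤ 1 := by omega
        have hall : xs.all (fun y => y.isEmpty) = true := by
          simp only [List.any_eq_false] at h1
          simp only [List.all_eq_true, List.isEmpty_iff]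
          intro y hy
          have := h1 y hy
          simpa [List.isEmpty_iff] using this
        rw [List.foldl_cons, show pvStepB (res, []) x = (res, x) by
          simp [pvStepB]; omega]
        rw [foldB_all_empty xs res x (by omega) hall]
        have hf : (x :: xs).filter (fun l => l.length > 1) = [] := by
          rw [List.filter_eq_nil_iff]
          intro a ha
          rcases List.mem_cons.mp ha with rfl | ha
          · simp; omega
          · have := List.all_eq_true.mp hall a ha
            simp [List.isEmpty_iff] at this
            simp [this]
        simp [hf]

-- character bookkeeping of the regrouped fold
lemma foldB_total : ∀ (ps res : List (List Char)) (t : List Char),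
    ((ps.foldl pvStepB (res, t)).1.map List.length).sum + ((ps.foldl pvStepB (res, t)).2).length
      = (res.map List.length).sum + t.length + (ps.map List.length).sum := by
  intro ps
  induction ps with
  | nil => intro res t; simp
  | cons x xs ih =>
    intro res t
    rw [List.foldl_cons]
    by_cases hb : (t ++ x).length > 1
    · rw [show pvStepB (res, t) x = (res ++ [t ++ x], []) from by
        simp only [pvStepB]; rw [if_pos hb]]
      rw [ih]; simp; omega
    · rw [show pvStepB (res, t) x = (res, t ++ x) from by
        simp only [pvStepB]; rw [if_neg hb]]
      rw [ih]; simp; omega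

lemma foldB_temp_le : ∀ (ps res : List (List Char)) (t : List Char),
    t.length ≤ 1 → ((ps.foldl pvStepB (res, t)).2).length ≤ 1 := by
  intro ps
  induction ps with
  | nil => intro res t ht; exact ht
  | cons x xs ih =>
    intro res t ht
    rw [List.foldl_cons]
    by_cases hb : (t ++ x).length > 1
    · rw [show pvStepB (res, t) x = (res ++ [t ++ x], []) from by
        simp only [pvStepB]; rw [if_pos hb]]
      exact ih _ [] (by simp)
    · rw [show pvStepB (res, t) x = (res, t ++ x) from by
        simp only [pvStepB]; rw [if_neg hb]]
      exact ih _ _ (by simpa using hb)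

lemma filter_total : ∀ ps : List (List Char),
    ((ps.filter (fun l => l.length > 1)).map List.length).sum
      + ps.countP (fun p => p.length == 1) = (ps.map List.length).sum := by
  intro ps
  induction ps with
  | nil => simp
  | cons x xs ih =>
    simp only [gt_iff_lt] at ih ⊢
    by_cases hx : 1 < x.length
    · have e2 : (x.length == 1) = false := by simp; omega
      simp [hx, e2]
      omega
    · by_cases h1 : x.length = 1
      · have e1 : (decide (1 < x.length)) = false := by simp; omega
        simp [h1]
        omega
      · have e1 : (decide (1 < x.length)) = false := by simp; omega
        have e2 : (x.length == 1) = false := by simp [h1]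
        have hx0 : x.length = 0 := by omega
        simp [hx0]
        omega

lemma stray_count_pos : ∀ ps : List (List Char),
    pvHasStray ps = true → 1 ≤ ps.countP (fun p => p.length == 1) := by
  intro ps
  induction ps with
  | nil => simp [pvHasStray]
  | cons x xs ih =>
    intro h
    simp only [pvHasStray, Bool.or_eq_true, Bool.and_eq_true] at h
    rw [List.countP_cons]
    rcases h with ⟨h1, _⟩ | h
    · simp [h1]
    · have := ih h; omega

lemma foldB_temp_count0 : ∀ (ps res : List (List Char)),
    ps.countP (fun p => p.length == 1) = 0 →
    (ps.foldl pvStepB (res, [])).2 = [] := by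
  intro ps
  induction ps with
  | nil => intro res _; rfl
  | cons x xs ih =>
    intro res hc
    rw [List.countP_cons] at hc
    by_cases h1 : x.length = 1
    · simp [h1] at hc
    · have hc' : xs.countP (fun p => p.length == 1) = 0 := by
        have : (x.length == 1) = false := by simp [h1]
        simpa [this] using hc
      by_cases hx : x.length > 1
      · rw [List.foldl_cons, show pvStepB (res, []) x = (res ++ [x], []) by
          simp [pvStepB, hx]]
        exact ih _ hc'
      · have hx0 : x = [] := by
          cases x with
          | nil => rfl
          | cons a l =>
            exfalso
            have e1 : l.length + 1 ≠ 1 := by simpa using h1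
            have e2 : ¬ l.length + 1 > 1 := by simpa using hx
            omega
        subst hx0
        rw [List.foldl_cons, show pvStepB (res, ([] : List Char)) [] = (res, []) by
          simp [pvStepB]]
        exact ih _ hc'

lemma foldB_temp_flushed : ∀ (ps res : List (List Char)) (t : List Char),
    t.length = 1 → ps.countP (fun p => p.length == 1) = 0 →
    ps.any (fun y => !y.isEmpty) = true →
    (ps.foldl pvStepB (res, t)).2 = [] := by
  intro ps
  induction ps with
  | nil => intro res t _ _ h; simp at h
  | cons x xs ih =>
    intro res t ht hc hany
    rw [List.countP_cons] at hc
    by_cases hx0 : x = []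
    · subst hx0
      rw [List.foldl_cons, show pvStepB (res, t) [] = (res, t) by
        simp [pvStepB]; omega]
      have hany' : xs.any (fun y => !y.isEmpty) = true := by
        simpa [List.any_cons] using hany
      exact ih res t ht (by simpa using hc) hany'
    · have hxlen : 1 < x.length := by
        have h1 : x.length ≠ 1 := by
          intro h; simp [h] at hc
        have : 0 < x.length := List.length_pos_iff.mpr hx0
        omega
      rw [List.foldl_cons, show pvStepB (res, t) x = (res ++ [t ++ x], []) by
        simp [pvStepB]; omega]
      have h1 : (x.length == 1) = false := by simp; omega
      exact foldB_temp_count0 xs _ (by simpa [h1] using hc)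

lemma foldB_temp_stray1 : ∀ (ps res : List (List Char)),
    pvHasStray ps = true → ps.countP (fun p => p.length == 1) = 1 →
    (ps.foldl pvStepB (res, [])).2 = [] := by
  intro ps
  induction ps with
  | nil => simp [pvHasStray]
  | cons x xs ih =>
    intro res hs hc
    rw [List.countP_cons] at hc
    by_cases h1 : x.length = 1
    · have hc' : xs.countP (fun p => p.length == 1) = 0 := by
        have hb1 : (x.length == 1) = true := by simp [h1]
        rw [hb1, if_pos rfl] at hc
        omega
      have hany : xs.any (fun y => !y.isEmpty) = true := by
        simp only [pvHasStray, Bool.or_eq_true, Bool.and_eq_true] at hs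
        rcases hs with ⟨_, h⟩ | h
        · exact h
        · exact absurd (stray_count_pos xs h) (by omega)
      rw [List.foldl_cons, show pvStepB (res, []) x = (res, x) by
        simp [pvStepB]; omega]
      exact foldB_temp_flushed xs res x h1 hc' hany
    · have hb : (x.length == 1) = false := by simp [h1]
      have hc' : xs.countP (fun p => p.length == 1) = 1 := by simpa [hb] using hc
      have hs' : pvHasStray xs = true := by
        simp only [pvHasStray, Bool.or_eq_true, Bool.and_eq_true] at hs
        rcases hs with ⟨h, _⟩ | h
        · exact absurd h (by simp [h1])
        · exact h
      by_cases hx : x.length > 1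
      · rw [List.foldl_cons, show pvStepB (res, []) x = (res ++ [x], []) by
          simp [pvStepB, hx]]
        exact ih _ hs' hc'
      · have hx0 : x = [] := by
          cases x with
          | nil => rfl
          | cons a l =>
            exfalso
            have e1 : l.length + 1 ≠ 1 := by simpa using h1
            have e2 : ¬ l.length + 1 > 1 := by simpa using hx
            omega
        subst hx0
        rw [List.foldl_cons, show pvStepB (res, ([] : List Char)) [] = (res, []) by
          simp [pvStepB]]
        exact ih _ hs' hc'

lemma ofList_inj : Function.Injective String.ofList := by
  intro a b h
  have := congrArg String.toList h
  simpa using this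

-- ===== VERDICT (by name: the statements are the Claim_ definitions above) =====
theorem texte_en_liste_spec : Claim_unchanged_texte_en_liste := by
  intro texte _ hD
  unfold D_texte_en_liste at hD
  rw [splitOn_eq_splitNL] at hD
  unfold texte_en_liste texte_en_liste_alt
  rw [splitOn_eq_splitNL, PySem.List.slice_to_neg_one, foldA_eq]
  rw [foldB_no_stray _ [] (by simpa using hD)]
  simp

theorem texte_en_liste_changed : Claim_changed_texte_en_liste := by
  unfold Claim_changed_texte_en_liste; decide

theorem texte_en_liste_tight : Claim_exact_texte_en_liste := by
  intro texte _ hD hEq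
  unfold D_texte_en_liste at hD
  rw [splitOn_eq_splitNL] at hD
  unfold texte_en_liste texte_en_liste_alt at hEq
  rw [splitOn_eq_splitNL, PySem.List.slice_to_neg_one, foldA_eq] at hEq
  set ps := (splitNL texte.toList).dropLast with hps
  have hLL : ((ps.foldl pvStepB ([], [])).1) = ps.filter (fun l => l.length > 1) := by
    have := List.map_injective_iff.mpr ofList_inj (by simpa using hEq)
    exact this
  have h1 := foldB_total ps [] []
  have h2 := filter_total ps
  have h3 := foldB_temp_le ps [] [] (by simp)
  have h4 := stray_count_pos ps hD
  rw [hLL] at h1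
  have hcount : ps.countP (fun p => p.length == 1) = ((ps.foldl pvStepB ([], [])).2).length := by
    simp at h1 h2
    omega
  have hc1 : ps.countP (fun p => p.length == 1) = 1 := by omega
  have := foldB_temp_stray1 ps [] hD hc1
  rw [this, List.length_nil] at hcount
  omega
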